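-- pv_equiv track=rewrite | github.com/skipsantos/COMP20008-Assigment-2 | Scripts/preprocessing_functions.py | join_characters
-- ===== SOURCE A (Python) =====
-- def join_characters(s):
--     text = s.split()
--     curr = ''
--     new_words = []
--     for word in text:
--         if len(word) == 1:
--             curr += word
--         else:
--             if curr:
--                 new_words.append(curr)
--                 curr = ''
--             new_words.append(word)
--
--     if curr:
--         new_words.append(curr)
--
--     return ' '.join(new_words)
-- ===== SOURCE B (Python) =====
-- def join_characters(s):
--     words = s.split()
--     n = len(words)
--     pieces = []
--     i = 0
--     while i < n:
--         if len(words[i]) == 1: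
--             j = i
--             while j < n and len(words[j]) == 1:
--                 j += 1
--             pieces.append(''.join(words[i:j]))
--             i = j
--         else:
--             pieces.append(words[i])
--             i += 1
--     return ' '.join(pieces)
-- ===== Notes on version B (the rewrite author's own statement) =====
-- stated objective: alternative
-- what changed: Replaces A's running character buffer with flush logic by a run-grouping scan: each maximal run of single-character words is located with an inner advance and joined in one step, multi-character words are emitted directly.
import Mathlib
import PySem

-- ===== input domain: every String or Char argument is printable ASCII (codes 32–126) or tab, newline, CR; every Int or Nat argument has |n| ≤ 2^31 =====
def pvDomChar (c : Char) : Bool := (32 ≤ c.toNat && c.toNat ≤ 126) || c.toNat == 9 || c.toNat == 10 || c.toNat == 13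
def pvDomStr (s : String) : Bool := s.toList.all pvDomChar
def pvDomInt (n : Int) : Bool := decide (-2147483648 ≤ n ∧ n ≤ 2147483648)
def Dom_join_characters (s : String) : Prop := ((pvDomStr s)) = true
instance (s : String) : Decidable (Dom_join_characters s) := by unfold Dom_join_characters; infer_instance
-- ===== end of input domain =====

-- B merges each maximal run of single-character words via run-grouping instead of A's running buffer with flush logic; alternative structure, same cost.

-- ===== PORT A =====
-- one loop step of A: state (curr, new_words)
def pvAStep (st : String × List String) (word : String) : String × List String :=
  if PySem.Str.len word = 1 then (st.1 ++ word, st.2)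
  else if st.1 ≠ "" then ("", (st.2 ++ [st.1]) ++ [word])
  else (st.1, st.2 ++ [word])

def join_characters (s : String) : String :=
  let text := PySem.Str.split₀ s
  let r := text.foldl pvAStep ("", [])
  PySem.Str.join " " (if r.1 ≠ "" then r.2 ++ [r.1] else r.2)

-- ===== PORT B =====
-- 'len(words[j]) == 1' as a Bool predicate for the inner advance
def pvSingle (w : String) : Bool := decide (PySem.Str.len w = 1)

-- B's outer while-loop: the inner while + words[i:j] slice becomes takeWhile/dropWhile on the rest
def pvCollect : List String → List String
  | [] => []
  | w :: rest =>
    if PySem.Str.len w = 1 then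
      PySem.Str.join "" (w :: rest.takeWhile pvSingle) :: pvCollect (rest.dropWhile pvSingle)
    else
      w :: pvCollect rest
termination_by l => l.length
decreasing_by
  · exact Nat.lt_succ_of_le (List.Sublist.length_le (List.dropWhile_sublist _))
  · simp

def join_characters_alt (s : String) : String :=
  PySem.Str.join " " (pvCollect (PySem.Str.split₀ s))

-- ===== PRECONDITION & SPEC =====
def Spec_join_characters (s : String) (out : String) : Prop := out = join_characters_alt s
instance (s : String) (out : String) : Decidable (Spec_join_characters s out) := by unfold Spec_join_characters; infer_instance

-- ===== CLAIM (what is proved, stated in full; the proofs are below) =====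
def Claim_equal_join_characters : Prop := ∀ (s : String), Dom_join_characters s → Spec_join_characters s (join_characters s)

-- ===== LEMMAS AND PROOFS =====

theorem pv_join_empty_nil : PySem.Str.join "" ([] : List String) = "" := rfl

theorem pv_join_empty_cons (a : String) (l : List String) :
    PySem.Str.join "" (a :: l) = a ++ PySem.Str.join "" l := by
  simp [PySem.Str.join, PySem.Chars.join, List.intercalate]
  cases l with
  | nil => simp
  | cons y r => simp [String.ofList_append]

theorem pv_append_assoc (a b c : String) : (a ++ b) ++ c = a ++ (b ++ c) :=
  String.append_assoc

theorem pv_len_one_append_ne (curr w : String) (h : PySem.Str.len w = 1) : curr ++ w ≠ "" := by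
  intro hc
  have hw : w.length = 1 := by simpa using h
  have hlen : (curr ++ w).length = 0 := by rw [hc]; rfl
  rw [String.length_append] at hlen
  omega

-- the loop invariant: A's fold with buffer curr and output acc equals acc ++ B's run-grouping,
-- with a nonempty buffer absorbed into the leading run of singles
theorem pv_loop_eq (ws : List String) : ∀ (curr : String) (acc : List String),
    (let r := ws.foldl pvAStep (curr, acc);
     if r.1 ≠ "" then r.2 ++ [r.1] else r.2) =
    acc ++ (if curr = "" then pvCollect ws
            else (curr ++ PySem.Str.join "" (ws.takeWhile pvSingle)) :: pvCollect (ws.dropWhile pvSingle)) := by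
  induction ws with
  | nil =>
    intro curr acc
    by_cases hc : curr = "" <;>
      simp [List.foldl, hc, pv_join_empty_nil, pvCollect]
  | cons w rest ih =>
    intro curr acc
    by_cases hw : PySem.Str.len w = 1
    · have hw' : w.length = 1 := by simpa using hw
      have hp : pvSingle w = true := by simp [pvSingle, hw']
      have hne := pv_len_one_append_ne curr w hw
      have hstep : pvAStep (curr, acc) w = (curr ++ w, acc) := by
        simp [pvAStep, hw']
      rw [List.foldl_cons, hstep, ih (curr ++ w) acc, if_neg hne]
      by_cases hc : curr = ""
      · subst hc
        simp [pvCollect, hw', pv_join_empty_cons]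
      · simp [hc, hp, pv_join_empty_cons, pv_append_assoc]
    · have hw' : ¬ w.length = 1 := by simpa using hw
      have hp : pvSingle w = false := by simp [pvSingle, hw']
      by_cases hc : curr = ""
      · subst hc
        have hstep : pvAStep ("", acc) w = ("", acc ++ [w]) := by
          simp [pvAStep, hw']
        rw [List.foldl_cons, hstep, ih "" (acc ++ [w])]
        simp [pvCollect, hw']
      · have hstep : pvAStep (curr, acc) w = ("", (acc ++ [curr]) ++ [w]) := by
          simp [pvAStep, hw', hc]
        rw [List.foldl_cons, hstep, ih "" ((acc ++ [curr]) ++ [w]), if_neg hc]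
        simp [pvCollect, hw', hp, pv_join_empty_nil]

theorem join_characters_spec : Claim_equal_join_characters := by
  intro s _
  show join_characters s = join_characters_alt s
  unfold join_characters join_characters_alt
  have h := pv_loop_eq (PySem.Str.split₀ s) "" []
  simp only [h]
  simp
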